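-- pv_equiv track=rewrite | github.com/mariaabr/MCD | AA/aula02/aula02_decreaseconquer.py | aExpBRecursive
-- ===== SOURCE A (Python) =====
-- def aExpBRecursive (a, b, count = 0):
--
--     # base cases
--
--     if b == 0:
--         return 1, count
--
--     if b == 1:
--         return a, count
--
--     half_exp, count = aExpBRecursive(a, b // 2, count)
--
--     if b % 2 == 0:
--         # even, a^b = (a^(b//2)) * (a^(b//2))
--         count += 1 # half * half
--         return half_exp * half_exp, count
--     else:
--         # odd, a^b = (a^(b//2)) * (a^(b//2)) * a
--         count += 2  # half * half * a
--         return half_exp * half_exp * a, count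
-- ===== SOURCE B (Python) =====
-- def aExpBRecursive(a, b, count=0):
--     if b == 0:
--         return 1, count
--     if b == 1:
--         return a, count
--     result = a
--     for ch in bin(b)[3:]:  # binary digits of b below the leading 1, MSB first
--         result *= result
--         count += 1
--         if ch == '1':
--             result *= a
--             count += 1
--     return result, count
-- ===== Notes on version B (the rewrite author's own statement) =====
-- stated objective: alternative
-- what changed: Replaced the top-down divide-by-two recursion with an iterative left-to-right binary-exponentiation loop over the bits of b below the leading 1; same result and same multiplication count, no recursion. Pre_ excludes b < 0, on which A recurses forever (RecursionError).
import Mathlib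
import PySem

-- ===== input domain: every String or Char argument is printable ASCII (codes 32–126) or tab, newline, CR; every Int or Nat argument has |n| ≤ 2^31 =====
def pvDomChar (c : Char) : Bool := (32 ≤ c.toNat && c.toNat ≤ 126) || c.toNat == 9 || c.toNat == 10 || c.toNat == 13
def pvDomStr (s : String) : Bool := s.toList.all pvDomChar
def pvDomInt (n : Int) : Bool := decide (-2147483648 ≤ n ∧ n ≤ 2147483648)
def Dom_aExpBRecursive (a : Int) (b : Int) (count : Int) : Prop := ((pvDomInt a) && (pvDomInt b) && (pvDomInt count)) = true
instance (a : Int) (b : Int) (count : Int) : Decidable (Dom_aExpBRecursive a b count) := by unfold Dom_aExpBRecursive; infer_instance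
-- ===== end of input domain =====

-- B replaces A's top-down halving recursion by an iterative MSB-to-LSB binary-exponentiation
-- loop over the bits of b below the leading 1 (alternative decomposition, same cost).


-- ===== PORT A =====
-- literal port of A; the 'b < 0' branch is only a totality guard (Python recurses forever
-- there, RecursionError; such inputs are outside Pre_)
def aExpBRecursive (a : Int) (b : Int) (count : Int) : Int × Int :=
  if b = 0 then (1, count)
  else if b = 1 then (a, count)
  else if _h : b < 0 then (1, count)
  else
    let r := aExpBRecursive a (PySem.Int.floordiv b 2) count
    let half_exp := r.1
    let count := r.2
    if PySem.Int.mod b 2 = 0 then (half_exp * half_exp, count + 1)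
    else (half_exp * half_exp * a, count + 2)
termination_by b.toNat
decreasing_by
  have h2 : (2:Int) ≤ b := by omega
  rw [PySem.Int.floordiv_eq_ediv_of_pos (by omega)]
  omega

-- ===== PORT B =====
-- binary digits of n, MSB first (bin(n) for n > 0)
def pvBits : Nat → List Bool
  | 0 => []
  | (n+1) => pvBits ((n+1) / 2) ++ [decide ((n+1) % 2 = 1)]
decreasing_by omega

def pvStep (a : Int) : Int × Int → Bool → Int × Int := fun rc bit =>
  let r := rc.1 * rc.1
  let c := rc.2 + 1
  if bit then (r * a, c + 1) else (r, c)

def aExpBRecursive_alt (a : Int) (b : Int) (count : Int) : Int × Int :=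
  if b = 0 then (1, count)
  else if b = 1 then (a, count)
  else ((pvBits b.toNat).drop 1).foldl (pvStep a) (a, count)

-- ===== PRECONDITION & SPEC =====
-- Pre_ excludes b < 0, on which Python A recurses forever (RecursionError).
def Pre_aExpBRecursive (a : Int) (b : Int) (count : Int) : Prop := 0 ≤ b
instance (a : Int) (b : Int) (count : Int) : Decidable (Pre_aExpBRecursive a b count) := by unfold Pre_aExpBRecursive; infer_instance
def pvWitness_aExpBRecursive : Int × Int × Int := (3, 13, 0)

def Spec_aExpBRecursive (a : Int) (b : Int) (count : Int) (out : Int × Int) : Prop := out = aExpBRecursive_alt a b count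
instance (a : Int) (b : Int) (count : Int) (out : Int × Int) : Decidable (Spec_aExpBRecursive a b count out) := by unfold Spec_aExpBRecursive; infer_instance

-- ===== CLAIM (what is proved, stated in full; the proofs are below) =====
def Claim_equal_aExpBRecursive : Prop := ∀ (a : Int) (b : Int) (count : Int), Dom_aExpBRecursive a b count → Pre_aExpBRecursive a b count → Spec_aExpBRecursive a b count (aExpBRecursive a b count)

-- ===== LEMMAS AND PROOFS =====
lemma pvBits_ne_nil (n : Nat) (h : 1 ≤ n) : pvBits n ≠ [] := by
  obtain ⟨m, rfl⟩ := Nat.exists_eq_add_of_le h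
  rw [Nat.add_comm]
  simp [pvBits]

-- A's recursion equals B's fold over the bits below the leading 1, for 1 ≤ n.
lemma pvMain (n : Nat) (hn : 1 ≤ n) (a count : Int) :
    ((pvBits n).drop 1).foldl (pvStep a) (a, count) = aExpBRecursive a (n : Int) count := by
  induction n using Nat.strong_induction_on generalizing count with
  | _ n ih =>
    match n, hn with
    | 1, _ => simp [pvBits, aExpBRecursive]
    | (m+2), _ =>
      set n := m + 2 with hn2
      have h1 : 1 ≤ n / 2 := by omega
      have hfd : PySem.Int.floordiv (n : Int) 2 = ((n / 2 : Nat) : Int) := by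
        exact_mod_cast PySem.Int.floordiv_natCast n 2
      have hmd : PySem.Int.mod (n : Int) 2 = ((n % 2 : Nat) : Int) := by
        exact_mod_cast PySem.Int.mod_natCast n 2
      have hbits : pvBits n = pvBits (n / 2) ++ [decide (n % 2 = 1)] := by
        rw [hn2]; rw [pvBits]
      have hdrop : (pvBits n).drop 1 = (pvBits (n / 2)).drop 1 ++ [decide (n % 2 = 1)] := by
        rw [hbits]
        obtain ⟨x, xs, hx⟩ : ∃ x xs, pvBits (n / 2) = x :: xs := by
          cases hpb : pvBits (n / 2) with
          | nil => exact absurd hpb (pvBits_ne_nil _ h1)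
          | cons x xs => exact ⟨x, xs, rfl⟩
        rw [hx]; simp
      rw [hdrop, List.foldl_append]
      rw [ih (n / 2) (by omega) h1 count]
      conv_rhs => rw [aExpBRecursive]
      have h0 : ¬ ((n : Int) = 0) := by omega
      have h1' : ¬ ((n : Int) = 1) := by omega
      have hneg : ¬ ((n : Int) < 0) := by omega
      rw [if_neg h0, if_neg h1', dif_neg hneg, hfd, hmd]
      rcases Nat.even_or_odd n with he | ho
      · have : n % 2 = 0 := Nat.even_iff.mp he
        simp [pvStep, this]
      · have : n % 2 = 1 := Nat.odd_iff.mp ho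
        simp [pvStep, this]
        omega

-- ===== VERDICT (by name: the statement is the Claim_ definition above) =====
theorem aExpBRecursive_spec : Claim_equal_aExpBRecursive := by
  intro a b count _ hpre
  unfold Spec_aExpBRecursive aExpBRecursive_alt
  by_cases h0 : b = 0
  · subst h0; rw [aExpBRecursive]; simp
  · by_cases h1 : b = 1
    · subst h1; rw [aExpBRecursive]; simp
    · have hb2 : (2:Int) ≤ b := by
        have : (0:Int) ≤ b := hpre
        omega
      have hbn : ((b.toNat : Nat) : Int) = b := Int.toNat_of_nonneg hpre
      rw [if_neg h0, if_neg h1]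
      rw [pvMain b.toNat (by omega) a count, hbn]
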